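-- pv_equiv track=rewrite | github.com/ghbsunny/pylearn | base_scirpt/word_count.py | makekey2
-- ===== SOURCE A (Python) =====
-- def makekey2(s:str):
--     chars = set(r"""!`"#./\()[],*-""")
--     key = s.lower()
--     ret = []
--     start = 0
--     length = len(key)
--
--     for i,c in enumerate(key):
--         if c in chars:
--             if start == i:
--                 start += 1
--                 continue
--             ret.append(key[start:i])
--             start = i + 1
--     else:
--         if start < len(key):
--             ret.append(key[start:])
--     return ret
-- ===== SOURCE B (Python) =====
-- def makekey2(s: str):
--     # Single pass building each token character by character: no start index,
--     # no slicing, no for-else; empty segments never arise.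
--     delims = set(r"""!`"#./\()[],*-""")
--     out = []
--     cur = []
--     for c in s.lower():
--         if c in delims:
--             if cur:
--                 out.append(''.join(cur))
--                 cur = []
--         else:
--             cur.append(c)
--     if cur:
--         out.append(''.join(cur))
--     return out
-- ===== Notes on version B (the rewrite author's own statement) =====
-- stated objective: simpler
-- what changed: A tracks a start index over the lowered string and appends slices key[start:i] via a for/else over enumerate; B keeps no indices at all and instead accumulates the current token character by character, flushing it on each delimiter and once at the end.
import Mathlib
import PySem

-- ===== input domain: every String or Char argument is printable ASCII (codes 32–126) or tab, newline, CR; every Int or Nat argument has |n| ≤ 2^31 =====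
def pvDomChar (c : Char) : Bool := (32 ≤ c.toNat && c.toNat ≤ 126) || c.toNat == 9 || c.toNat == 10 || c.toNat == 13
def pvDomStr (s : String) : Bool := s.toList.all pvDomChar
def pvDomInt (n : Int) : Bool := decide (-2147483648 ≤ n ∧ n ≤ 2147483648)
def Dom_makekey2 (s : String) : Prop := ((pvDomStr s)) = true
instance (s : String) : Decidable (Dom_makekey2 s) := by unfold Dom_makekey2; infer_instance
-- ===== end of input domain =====

-- B replaces A's start-index/slice bookkeeping by a single pass that builds each
-- token character by character (objective: simpler). Equivalence is total.

-- ===== PORT A =====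
-- chars = set(r"""!`"#./\()[],*-""")
def makekey2Chars : PySem.Set Char := PySem.Set.ofList "!`\"#./\\()[],*-".toList

-- the for-loop over enumerate(key), carrying (i, ret, start); slices via PySem.List.slice
def makekey2Loop (key : List Char) : List Char → Nat → List (List Char) → Nat →
    List (List Char) × Nat
  | [], _, ret, start => (ret, start)
  | c :: rest, i, ret, start =>
    if PySem.Set.contains makekey2Chars c then
      if start = i then makekey2Loop key rest (i + 1) ret (i + 1)
      else makekey2Loop key rest (i + 1)
             (ret ++ [PySem.List.slice key (some (start : Int)) (some (i : Int))]) (i + 1)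
    else makekey2Loop key rest (i + 1) ret start

-- slices are taken on the lowered code-point list; tokens become Strings at the end (exact)
def makekey2 (s : String) : List String :=
  let key := PySem.Chars.lower s.toList
  let p := makekey2Loop key key 0 [] 0
  let ret := if p.2 < key.length then p.1 ++ [PySem.List.slice key (some ((p.2 : Nat) : Int)) none] else p.1
  ret.map String.ofList

-- ===== PORT B =====
-- delims = set(r"""!`"#./\()[],*-""")
def makekey2AltDelims : PySem.Set Char := PySem.Set.ofList "!`\"#./\\()[],*-".toList

-- one loop iteration over state (out, cur): flush cur on a delimiter, else extend it
def makekey2AltStep (st : List (List Char) × List Char) (c : Char) :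
    List (List Char) × List Char :=
  if PySem.Set.contains makekey2AltDelims c then
    if st.2 ≠ [] then (st.1 ++ [st.2], []) else st
  else (st.1, st.2 ++ [c])

def makekey2_alt (s : String) : List String :=
  let q := (PySem.Chars.lower s.toList).foldl makekey2AltStep ([], [])
  (if q.2 ≠ [] then q.1 ++ [q.2] else q.1).map String.ofList

-- ===== PRECONDITION & SPEC =====
def Spec_makekey2 (s : String) (out : List String) : Prop := out = makekey2_alt s
instance (s : String) (out : List String) : Decidable (Spec_makekey2 s out) := by unfold Spec_makekey2; infer_instance

-- ===== CLAIM (what is proved, stated in full; the proofs are below) =====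
def Claim_equal_makekey2 : Prop := ∀ (s : String), Dom_makekey2 s → Spec_makekey2 s (makekey2 s)

-- ===== LEMMAS AND PROOFS =====

-- the invariant: A's (start, i) window is exactly B's pending token `pre`
-- the invariant: A's (start, i) window is exactly B's pending token
theorem makekey2_loop_eq (key : List Char) :
    ∀ (cs pre : List Char) (start : Nat) (ret : List (List Char)),
      key.drop start = pre ++ cs →
      (let p := makekey2Loop key cs (start + pre.length) ret start
       if p.2 < key.length then p.1 ++ [key.drop p.2] else p.1)
      = (let q := cs.foldl makekey2AltStep (ret, pre)
         if q.2 ≠ [] then q.1 ++ [q.2] else q.1) := by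
  intro cs
  induction cs with
  | nil =>
    intro pre start ret h
    rw [List.append_nil] at h
    simp only [makekey2Loop, List.foldl_nil]
    by_cases hp : pre = []
    · have hle : key.length ≤ start := List.drop_eq_nil_iff.mp (by rw [h, hp])
      simp [hp, Nat.not_lt.mpr hle]
    · have hlt : start < key.length := by
        by_contra hh
        exact hp (by rw [← h]; exact List.drop_eq_nil_iff.mpr (Nat.not_lt.mp hh))
      simp [hp, hlt, h]
  | cons c cs ih =>
    intro pre start ret h
    simp only [makekey2Loop, List.foldl_cons, makekey2AltStep]
    by_cases hc : PySem.Set.contains makekey2Chars c = true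
    · have hc' : PySem.Set.contains makekey2AltDelims c = true := hc
      by_cases hp : pre = []
      · subst hp
        rw [List.nil_append] at h
        have hdrop : key.drop (start + 1) = cs := by
          rw [← List.tail_drop, h]; rfl
        simp only [hc, hc', List.length_nil, Nat.add_zero, ne_eq,
          not_true_eq_false, if_true, ite_false]
        simpa using ih [] (start + 1) ret (by simpa using hdrop)
      · have hne : ¬ start = start + pre.length := by
          have : 0 < pre.length := List.length_pos_iff.mpr hp
          omega
        have hslice : PySem.List.slice key (some (start : Int)) (some ((start + pre.length : Nat) : Int)) = pre := by
          rw [PySem.List.slice_natCast, h]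
          simp
        have hdrop1 : key.drop (start + pre.length) = c :: cs := by
          rw [← List.drop_drop, h, List.drop_left]
        have hdrop : key.drop (start + pre.length + 1) = cs := by
          rw [← List.tail_drop, hdrop1]; rfl
        simp only [hc, hc', if_neg hne, ne_eq, hp, not_false_eq_true, if_true, hslice]
        simpa using ih [] (start + pre.length + 1) (ret ++ [pre]) (by simpa using hdrop)
    · rw [Bool.not_eq_true] at hc
      have hc' : PySem.Set.contains makekey2AltDelims c = false := hc
      simp only [hc, hc', Bool.false_eq_true, if_false]
      have h' : key.drop start = (pre ++ [c]) ++ cs := by simpa using h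
      have := ih (pre ++ [c]) start ret h'
      simpa [Nat.add_assoc] using this

-- ===== VERDICT (by name: the statement is the Claim_ definition above) =====
theorem makekey2_spec : Claim_equal_makekey2 := by
  intro s _
  unfold Spec_makekey2 makekey2 makekey2_alt
  have h := makekey2_loop_eq (PySem.Chars.lower s.toList) (PySem.Chars.lower s.toList) [] 0 [] (by simp)
  simp only [List.length_nil, Nat.add_zero] at h
  simp only [PySem.List.slice_from_natCast]
  rw [h]
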